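-- pv_equiv track=rewrite | github.com/ThenTech/BDA-Assignments | Plagiarism/Resources/submissions/submissions/2200732.py | is_palindrome_sentence
-- ===== SOURCE A (Python) =====
-- def omdraaien(string):
--     x = ""
--     for i in range(len(string)):
--         x += string[len(string) - i - 1]
--     return x.upper()
--
-- def is_palindrome_sentence(string):
--     verboden_tekens = [" ", ",", "?", ".", ";", ":", "/", "”", "’", "“","!"]
--     string1 = ""
--     for letter in string:
--         if letter not in verboden_tekens:
--             string1 = string1 + letter
--     string1 = string1.upper()
--
--     if string1 == omdraaien(string1):
--         return True
--     else:
--         return False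
-- ===== SOURCE B (Python) =====
-- def is_palindrome_sentence(string):
--     verboden_tekens = [" ", ",", "?", ".", ";", ":", "/", "\u201d", "\u2019", "\u201c", "!"]
--     s = [c.upper() for c in string if c not in verboden_tekens]
--     i, j = 0, len(s) - 1
--     while i < j:
--         if s[i] != s[j]:
--             return False
--         i += 1
--         j -= 1
--     return True
-- ===== Notes on version B (the rewrite author's own statement) =====
-- stated objective: alternative
-- what changed: B keeps the same normalization (filter the forbidden characters, uppercase) but replaces building a reversed copy by repeated string concatenation and comparing whole strings with a two-pointer scan: i from the left and j from the right meet in the middle, returning False at the first mismatch; no reversed string is allocated.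
import Mathlib
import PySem

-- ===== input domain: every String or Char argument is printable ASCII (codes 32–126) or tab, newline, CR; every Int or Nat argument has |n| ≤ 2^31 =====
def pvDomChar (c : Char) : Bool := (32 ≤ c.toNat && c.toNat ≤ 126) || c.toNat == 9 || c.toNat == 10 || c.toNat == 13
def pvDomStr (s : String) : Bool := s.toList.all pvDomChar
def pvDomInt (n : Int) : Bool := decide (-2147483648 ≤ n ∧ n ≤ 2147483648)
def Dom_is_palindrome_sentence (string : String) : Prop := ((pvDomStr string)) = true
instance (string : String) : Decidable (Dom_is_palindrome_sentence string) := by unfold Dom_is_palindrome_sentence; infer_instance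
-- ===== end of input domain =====

-- B replaces A's reverse-and-compare (built by quadratic concatenation) with a two-pointer
-- scan meeting in the middle with early exit; same filtering and uppercasing. (objective: alternative; avoids the reversed copy)

-- ===== PORT A =====
def pvForbidden : List Char := [' ', ',', '?', '.', ';', ':', '/', '”', '’', '“', '!']

-- omdraaien: x = ""; for i in range(len(string)): x += string[len(string)-i-1]; return x.upper()
def pvOmdraaien (cs : List Char) : List Char :=
  PySem.Chars.upper
    ((PySem.List.pyRange 0 (cs.length : Int) 1).foldl
      (fun x i => x ++ [PySem.List.pyGetD cs ((cs.length : Int) - i - 1) ' ']) [])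

def is_palindrome_sentence (string : String) : Bool :=
  let string1 :=
    string.toList.foldl
      (fun acc letter => if letter ∈ pvForbidden then acc else acc ++ [letter]) []
  let string1 := PySem.Chars.upper string1
  if string1 = pvOmdraaien string1 then true else false

-- ===== PORT B =====
-- while i < j: if s[i] != s[j]: return False; i += 1; j -= 1
def pvTwoPtr (s : List Char) (i j : Nat) : Bool :=
  if i < j then
    if s.getD i ' ' ≠ s.getD j ' ' then false
    else pvTwoPtr s (i + 1) (j - 1)
  else true
termination_by j - i

def is_palindrome_sentence_alt (string : String) : Bool :=
  let s := (string.toList.filter (fun c => decide (c ∉ pvForbidden))).map PySem.Chars.upperChar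
  pvTwoPtr s 0 (s.length - 1)

-- ===== PRECONDITION & SPEC =====
def Spec_is_palindrome_sentence (string : String) (out : Bool) : Prop := out = is_palindrome_sentence_alt string
instance (string : String) (out : Bool) : Decidable (Spec_is_palindrome_sentence string out) := by unfold Spec_is_palindrome_sentence; infer_instance

-- ===== CLAIM (what is proved, stated in full; the proofs are below) =====
def Claim_equal_is_palindrome_sentence : Prop := ∀ (string : String), Dom_is_palindrome_sentence string → Spec_is_palindrome_sentence string (is_palindrome_sentence string)

-- ===== LEMMAS AND PROOFS =====

-- A's accumulation loop is filtering.
theorem pv_foldl_filter (cs acc : List Char) :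
    cs.foldl (fun acc letter => if letter ∈ pvForbidden then acc else acc ++ [letter]) acc
      = acc ++ cs.filter (fun c => decide (c ∉ pvForbidden)) := by
  induction cs generalizing acc with
  | nil => simp
  | cons c cs ih =>
    simp only [List.foldl_cons, List.filter_cons]
    by_cases h : c ∈ pvForbidden <;> simp [h, ih]

theorem pv_toNat_ofNat (n : Nat) (h : n < 55296) : (Char.ofNat n).toNat = n := by
  unfold Char.ofNat
  split
  · rfl
  · omega

theorem pv_upperChar_idem (c : Char) :
    PySem.Chars.upperChar (PySem.Chars.upperChar c) = PySem.Chars.upperChar c := by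
  unfold PySem.Chars.upperChar PySem.Chars.islower
  by_cases h : 'a' ≤ c ∧ c ≤ 'z'
  · obtain ⟨h1, h2⟩ := h
    have h1' : 97 ≤ c.toNat := h1
    have h2' : c.toNat ≤ 122 := h2
    have hv : (Char.ofNat (c.toNat - 32)).toNat = c.toNat - 32 := pv_toNat_ofNat _ (by omega)
    have hna : ¬ ('a' ≤ Char.ofNat (c.toNat - 32)) := by
      intro hle
      have : 97 ≤ (Char.ofNat (c.toNat - 32)).toNat := hle
      omega
    simp [h1, h2, hna]
  · rcases not_and_or.mp h with h' | h' <;> simp [h']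

-- A's index loop in omdraaien builds the reverse (before the final .upper()).
theorem pv_omdraaien_loop (cs : List Char) :
    (PySem.List.pyRange 0 (cs.length : Int) 1).foldl
      (fun x i => x ++ [PySem.List.pyGetD cs ((cs.length : Int) - i - 1) ' ']) []
      = cs.reverse := by
  rw [PySem.List.foldl_append_singleton_eq_map, PySem.List.pyRange_zero_nat, List.map_map]
  apply List.ext_getElem
  · simp
  · intro k h1 h2
    have hk : k < cs.length := by simpa using h1
    simp only [List.nil_append, List.getElem_map, List.getElem_range, Function.comp_apply]
    have : ((cs.length : Int) - (k : Int) - 1) = ((cs.length - 1 - k : Nat) : Int) := by omega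
    rw [this, PySem.List.pyGetD_natCast, List.getD_eq_getElem _ _ (by omega),
      List.getElem_reverse]

-- Two-pointer loop ↔ the mirrored-pairs condition on [i, j].
theorem pv_twoPtr_iff (s : List Char) (i j : Nat) :
    pvTwoPtr s i j = true ↔
      ∀ k, i ≤ k → k ≤ j → s.getD k ' ' = s.getD (i + j - k) ' ' := by
  induction i, j using pvTwoPtr.induct s with
  | case1 i j hlt hne =>
    rw [pvTwoPtr]
    simp only [hlt, if_true]
    rw [if_pos hne]
    constructor
    · intro h; exact absurd h (by simp)
    · intro h
      exact absurd (by have := h i le_rfl (by omega); simpa using this) (by simpa using hne)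
  | case2 i j hlt hne ih =>
    rw [pvTwoPtr]
    simp only [hlt, if_true, hne, if_false]
    rw [ih]
    have heq : s.getD i ' ' = s.getD j ' ' := by
      by_cases h : s.getD i ' ' = s.getD j ' '
      · exact h
      · exact absurd h (by simpa using hne)
    constructor
    · intro h k hk1 hk2
      rcases Nat.lt_or_ge k (i + 1) with hk | hk
      · have hki : k = i := by omega
        have h2 : i + j - k = j := by omega
        rw [h2, hki]; exact heq
      · rcases Nat.lt_or_ge (j - 1) k with hk' | hk'
        · have hkj : k = j := by omega
          have h2 : i + j - k = i := by omega
          rw [h2, hkj]; exact heq.symm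
        · have := h k hk hk'
          have harith : i + 1 + (j - 1) - k = i + j - k := by omega
          rwa [harith] at this
    · intro h k hk1 hk2
      have := h k (by omega) (by omega)
      have harith : i + j - k = i + 1 + (j - 1) - k := by omega
      rwa [harith] at this
  | case3 i j hge =>
    rw [pvTwoPtr]
    simp only [hge, if_false]
    constructor
    · intro _ k hk1 hk2
      have : k = i ∧ i = j ∨ j < i := by omega
      rcases this with ⟨h1, h2⟩ | h2
      · subst h1; subst h2
        have : k + k - k = k := by omega
        rw [this]
      · omega
    · intro _; trivial

-- The two-pointer scan from the ends decides s = s.reverse.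
theorem pv_twoPtr_reverse (s : List Char) :
    pvTwoPtr s 0 (s.length - 1) = decide (s = s.reverse) := by
  have hiff : pvTwoPtr s 0 (s.length - 1) = true ↔ s = s.reverse := by
    rw [pv_twoPtr_iff]
    constructor
    · intro h
      apply List.ext_getElem
      · simp
      · intro k h1 h2
        have hk : k < s.length := h1
        have := h k (Nat.zero_le _) (by omega)
        rw [List.getD_eq_getElem _ _ hk] at this
        rw [List.getElem_reverse]
        have harith : 0 + (s.length - 1) - k = s.length - 1 - k := by omega
        rw [harith, List.getD_eq_getElem _ _ (by omega)] at this
        exact this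
    · intro h k hk1 hk2
      rcases Nat.eq_zero_or_pos s.length with hn | hn
      · have hnil : s = [] := List.eq_nil_of_length_eq_zero hn
        subst hnil; rfl
      · have hk : k < s.length := by omega
        have hk' : s.length - 1 - k < s.length := by omega
        have harith : 0 + (s.length - 1) - k = s.length - 1 - k := by omega
        rw [harith]
        calc s.getD k ' ' = s[k] := List.getD_eq_getElem _ _ hk
          _ = s.reverse[s.length - 1 - k]'(by simpa using hk') := by
                rw [List.getElem_reverse]
                congr 1
                omega
          _ = s[s.length - 1 - k]'hk' := List.getElem_of_eq h.symm _
          _ = s.getD (s.length - 1 - k) ' ' := (List.getD_eq_getElem _ _ hk').symm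
  by_cases h : s = s.reverse
  · rw [hiff.mpr h, decide_eq_true h]
  · have : pvTwoPtr s 0 (s.length - 1) ≠ true := fun hc => h (hiff.mp hc)
    simp only [Bool.not_eq_true] at this
    rw [this, decide_eq_false h]

-- ===== VERDICT (by name: the statement is the Claim_ definition above) =====
theorem is_palindrome_sentence_spec : Claim_equal_is_palindrome_sentence := by
  intro string _
  unfold Spec_is_palindrome_sentence is_palindrome_sentence is_palindrome_sentence_alt
  simp only [pv_foldl_filter, List.nil_append]
  set f := string.toList.filter (fun c => decide (c ∉ pvForbidden)) with hf
  have hom : pvOmdraaien (PySem.Chars.upper f) = (PySem.Chars.upper f).reverse := by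
    unfold pvOmdraaien
    rw [pv_omdraaien_loop]
    unfold PySem.Chars.upper
    rw [← List.map_reverse, List.map_map]
    congr 1
    funext c
    exact pv_upperChar_idem c
  rw [hom, pv_twoPtr_reverse]
  have : PySem.Chars.upper f = f.map PySem.Chars.upperChar := rfl
  rw [← this]
  split_ifs with h
  · exact (decide_eq_true h).symm
  · exact (decide_eq_false h).symm
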